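-- pv_equiv track=rewrite | github.com/shd33/writeups-FCSC-2020 | crypto/Pippin/pippin.py | ones_comb
-- ===== SOURCE A (Python) =====
-- def ones_comb(key_zeros):
-- 	key_line1 = []
-- 	key_line2 = []
-- 	sig = 1
-- 	for i in key_zeros:
-- 		if i == 0:
-- 			key_line1.append(0)
-- 			key_line2.append(0)
-- 		else:
-- 			key_line1.append(sig)
-- 			key_line2.append(1 - sig)
-- 			sig = 0
-- 	return key_line1, key_line2
-- ===== SOURCE B (Python) =====
-- def ones_comb(key_zeros):
-- 	j = next((i for i, x in enumerate(key_zeros) if x != 0), None)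
-- 	pairs = [(0, 0) if x == 0 else ((1, 0) if i == j else (0, 1))
-- 	         for i, x in enumerate(key_zeros)]
-- 	return [p[0] for p in pairs], [p[1] for p in pairs]
-- ===== Notes on version B (the rewrite author's own statement) =====
-- stated objective: simpler
-- what changed: Replaces the mutable sig flag threaded through the loop by a precomputed first-nonzero index and a single enumerate pass that classifies each position by value and index.
import Mathlib
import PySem

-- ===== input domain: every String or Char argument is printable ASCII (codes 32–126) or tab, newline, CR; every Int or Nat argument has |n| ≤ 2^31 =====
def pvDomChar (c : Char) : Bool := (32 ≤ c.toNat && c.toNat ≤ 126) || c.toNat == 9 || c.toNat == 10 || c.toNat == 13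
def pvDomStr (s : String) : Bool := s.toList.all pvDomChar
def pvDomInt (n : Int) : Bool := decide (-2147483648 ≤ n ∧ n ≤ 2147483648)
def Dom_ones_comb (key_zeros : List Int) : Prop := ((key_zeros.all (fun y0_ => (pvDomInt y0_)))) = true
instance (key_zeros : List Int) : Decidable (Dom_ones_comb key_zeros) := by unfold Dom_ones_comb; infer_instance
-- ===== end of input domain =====

-- ===== PORT A =====
-- Loop of A: state (key_line1 rev-built via cons on recursion, sig); branches in source order.
def ones_comb_loop : List Int → Int → List Int × List Int
  | [], _ => ([], [])
  | i :: rest, sig =>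
    if i = 0 then
      let p := ones_comb_loop rest sig
      (0 :: p.1, 0 :: p.2)
    else
      let p := ones_comb_loop rest 0
      (sig :: p.1, (1 - sig) :: p.2)

def ones_comb (key_zeros : List Int) : List Int × List Int :=
  ones_comb_loop key_zeros 1

-- ===== PORT B =====
-- B helper: first index i with x != 0 in enumerate order (the next(...) generator), None if absent.
def ones_comb_firstNZ : List (Int × Int) → Option Int
  | [] => none
  | (i, x) :: rest => if x ≠ 0 then some i else ones_comb_firstNZ rest

def ones_comb_alt (key_zeros : List Int) : List Int × List Int :=
  let j := ones_comb_firstNZ (PySem.List.enumerate key_zeros)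
  let pairs := (PySem.List.enumerate key_zeros).map
    (fun p => if p.2 = 0 then ((0 : Int), (0 : Int))
              else if some p.1 = j then (1, 0) else (0, 1))
  (pairs.map Prod.fst, pairs.map Prod.snd)

-- ===== PRECONDITION & SPEC =====
def Spec_ones_comb (key_zeros : List Int) (out : List Int × List Int) : Prop := out = ones_comb_alt key_zeros
instance (key_zeros : List Int) (out : List Int × List Int) : Decidable (Spec_ones_comb key_zeros out) := by unfold Spec_ones_comb; infer_instance

-- ===== CLAIM (what is proved, stated in full; the proofs are below) =====
def Claim_equal_ones_comb : Prop := ∀ (key_zeros : List Int), Dom_ones_comb key_zeros → Spec_ones_comb key_zeros (ones_comb key_zeros)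

-- ===== LEMMAS AND PROOFS =====

-- ===== VERDICT (by name: the statement is the Claim_ definition above) =====
-- with sig = 0 the flag is spent: both lines depend on the value only
theorem ones_comb_loop_zero (xs : List Int) (s : Int) :
    ones_comb_loop xs 0 =
      (((PySem.List.enumerate xs s).map
          (fun p => if p.2 = 0 then ((0 : Int), (0 : Int)) else (0, 1))).map Prod.fst,
       ((PySem.List.enumerate xs s).map
          (fun p => if p.2 = 0 then ((0 : Int), (0 : Int)) else (0, 1))).map Prod.snd) := by
  induction xs generalizing s with
  | nil => rfl
  | cons x xs ih =>
    simp only [ones_comb_loop, PySem.List.enumerate_cons, List.map_cons]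
    by_cases hx : x = 0 <;> simp [hx, ih (s + 1)]

-- every index of enumerate xs (s+1) differs from s
theorem ones_comb_idx_ne (xs : List Int) (s : Int) (p : Int × Int)
    (hp : p ∈ PySem.List.enumerate xs (s + 1)) : p.1 ≠ s := by
  rcases (PySem.List.mem_enumerate_iff xs (s + 1) p).1 hp with ⟨k, hk, rfl⟩
  simp; omega

theorem ones_comb_main (xs : List Int) (s : Int) :
    ones_comb_loop xs 1 =
      (((PySem.List.enumerate xs s).map
          (fun p => if p.2 = 0 then ((0 : Int), (0 : Int))
                    else if some p.1 = ones_comb_firstNZ (PySem.List.enumerate xs s) then (1, 0)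
                    else (0, 1))).map Prod.fst,
       ((PySem.List.enumerate xs s).map
          (fun p => if p.2 = 0 then ((0 : Int), (0 : Int))
                    else if some p.1 = ones_comb_firstNZ (PySem.List.enumerate xs s) then (1, 0)
                    else (0, 1))).map Prod.snd) := by
  induction xs generalizing s with
  | nil => rfl
  | cons x xs ih =>
    simp only [ones_comb_loop, PySem.List.enumerate_cons, ones_comb_firstNZ, List.map_cons]
    by_cases hx : x = 0
    · simp only [hx, ite_true, ne_eq, not_true_eq_false]
      simp [ih (s + 1)]
    · simp only [ne_eq, hx, not_false_eq_true, ite_true]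
      simp [ones_comb_loop_zero xs (s + 1)]
      constructor <;>
        · intro a b hab
          have hne : a ≠ s := ones_comb_idx_ne xs s (a, b) hab
          by_cases hb : b = 0 <;> simp [hb, hne]

theorem ones_comb_spec : Claim_equal_ones_comb := by
  intro xs _
  unfold Spec_ones_comb ones_comb ones_comb_alt
  exact ones_comb_main xs 0
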